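-- pv_equiv track=rewrite | github.com/daniel-reich/ubiquitous-fiesta | Cgnn4Gas3QpP4QcSL_12.py | sum_digits_in_range
-- ===== SOURCE A (Python) =====
-- from itertools import islice
--
-- def sum_digits_in_range(n):
--   def gen():
--     n,x = 0, 45
--     yield 0
--     yield x
--     while True:
--       n+=1
--       x = 10*x + 45*10**(n)
--       yield x
--
--   g = gen()
--   return list(islice(g,n,n+1))[0]
-- ===== SOURCE B (Python) =====
-- def sum_digits_in_range(n):
--     if n == 0:
--         return 0
--     return 45 * n * 10 ** (n - 1)
-- ===== Notes on version B (the rewrite author's own statement) =====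
-- stated objective: faster
-- what changed: Replaced the generator loop that iterates the recurrence n times with the closed form 45*n*10^(n-1) (0 for n=0).
import Mathlib
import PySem

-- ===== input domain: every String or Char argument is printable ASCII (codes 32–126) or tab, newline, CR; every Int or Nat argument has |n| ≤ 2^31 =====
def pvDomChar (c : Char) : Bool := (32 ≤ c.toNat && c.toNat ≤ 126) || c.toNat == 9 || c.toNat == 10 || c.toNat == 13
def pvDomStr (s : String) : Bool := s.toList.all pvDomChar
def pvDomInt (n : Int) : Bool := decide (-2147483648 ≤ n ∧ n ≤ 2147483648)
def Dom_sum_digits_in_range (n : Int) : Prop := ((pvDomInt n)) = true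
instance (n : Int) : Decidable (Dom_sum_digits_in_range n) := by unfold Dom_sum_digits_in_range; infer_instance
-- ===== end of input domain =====

-- B replaces A's n-step generator recurrence with the closed form 45*n*10^(n-1): asymptotically faster.

-- ===== PORT A =====
-- the generator's while-loop: state (nv, x), run `steps` more iterations after the first two yields
def sum_digits_in_range_loop (nv : Nat) (x : Int) (steps : Nat) : Int :=
  match steps with
  | 0 => x
  | s + 1 => sum_digits_in_range_loop (nv + 1) (10 * x + 45 * 10 ^ (nv + 1)) s

-- islice(g, n, n+1) takes the n-th yielded value: index 0 → 0, index 1 → 45, index k+2 → loop run k+1 times from (0,45)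
def sum_digits_in_range (n : Int) : Int :=
  match n.toNat with
  | 0 => 0
  | 1 => 45
  | k + 2 => sum_digits_in_range_loop 0 45 (k + 1)

-- ===== PORT B =====
def sum_digits_in_range_alt (n : Int) : Int :=
  if n == 0 then 0 else 45 * n * 10 ^ (n - 1).toNat

-- ===== PRECONDITION & SPEC =====
-- Pre_: n ≥ 0; on negative n, A raises ValueError (islice rejects negative indices).
def Pre_sum_digits_in_range (n : Int) : Prop := 0 ≤ n
instance (n : Int) : Decidable (Pre_sum_digits_in_range n) := by unfold Pre_sum_digits_in_range; infer_instance
def pvWitness_sum_digits_in_range : Int := 3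

def Spec_sum_digits_in_range (n : Int) (out : Int) : Prop := out = sum_digits_in_range_alt n
instance (n : Int) (out : Int) : Decidable (Spec_sum_digits_in_range n out) := by unfold Spec_sum_digits_in_range; infer_instance

-- ===== CLAIM (what is proved, stated in full; the proofs are below) =====
def Claim_equal_sum_digits_in_range : Prop := ∀ (n : Int), Dom_sum_digits_in_range n → Pre_sum_digits_in_range n → Spec_sum_digits_in_range n (sum_digits_in_range n)

-- ===== LEMMAS AND PROOFS =====

-- loop invariant: running s steps from state (m, 45*(m+1)*10^m) lands at 45*(m+s+1)*10^(m+s)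
theorem sum_digits_in_range_loop_closed (s m : Nat) :
    sum_digits_in_range_loop m (45 * (m + 1) * 10 ^ m) s = 45 * ((m : Int) + s + 1) * 10 ^ (m + s) := by
  induction s generalizing m with
  | zero => simp [sum_digits_in_range_loop]
  | succ s ih =>
    have hstep : (10 : Int) * (45 * (m + 1) * 10 ^ m) + 45 * 10 ^ (m + 1)
        = 45 * ((m + 1 : Nat) + 1) * 10 ^ (m + 1) := by push_cast; ring
    calc sum_digits_in_range_loop m (45 * (m + 1) * 10 ^ m) (s + 1)
        = sum_digits_in_range_loop (m + 1) (45 * ((m + 1 : Nat) + 1) * 10 ^ (m + 1)) s := by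
          simp [sum_digits_in_range_loop, hstep]
      _ = 45 * ((m : Int) + 1 + s + 1) * 10 ^ (m + 1 + s) := by
          rw [ih (m + 1)]; push_cast; ring
      _ = 45 * ((m : Int) + (s + 1) + 1) * 10 ^ (m + (s + 1)) := by
          ring_nf

-- ===== VERDICT (by name: the statement is the Claim_ definition above) =====
theorem sum_digits_in_range_spec : Claim_equal_sum_digits_in_range := by
  intro n _ hpre
  unfold Spec_sum_digits_in_range sum_digits_in_range sum_digits_in_range_alt
  have hn : n = (n.toNat : Int) := (Int.toNat_of_nonneg hpre).symm
  rcases h : n.toNat with _ | k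
  · have : n = 0 := by omega
    simp [this]
  · rcases k with _ | k
    · have : n = 1 := by omega
      simp [this]
    · have hn2 : n = ((k : Int) + 2) := by omega
      have hne : ¬ (n == 0) = true := by simp [hn2]; omega
      simp only [hne]
      have h45 : (45 : Int) = 45 * ((0 : Nat) + 1) * 10 ^ (0 : Nat) := by norm_num
      rw [h45, sum_digits_in_range_loop_closed (k + 1) 0]
      have htn : (n - 1).toNat = k + 1 := by omega
      rw [htn, hn2]; push_cast; ring
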